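-- pv_equiv track=rewrite | github.com/inkyblinkypinkyclyde/tdd | python/mushroom_scales/src/mushroom_scales.py | scales
-- ===== SOURCE A (Python) =====
-- def scales(weights_dict, target_weight):
--     result = []
--     for key_a in weights_dict:
--         if weights_dict[key_a] == target_weight:
--             result.append(key_a)
--             return result
--         for key_b in weights_dict:
--             if key_a != key_b:
--                 if weights_dict[key_a] + weights_dict[key_b] == target_weight:
--                     result.append(key_a)
--                     result.append(key_b)
--                     return result
--                 else:
--                     for key_c in weights_dict:
--                         if key_a != key_c and key_b != key_c:
--                             if weights_dict[key_a] + weights_dict[key_b] + weights_dict[key_c] == target_weight: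
--                                 result.append(key_a)
--                                 result.append(key_b)
--                                 result.append(key_c)
--                                 return result
--     return result
-- ===== SOURCE B (Python) =====
-- def scales(weights_dict, target_weight):
--     # index: weight -> keys with that weight, in insertion order
--     by_weight = {}
--     for k, v in weights_dict.items():
--         by_weight.setdefault(v, []).append(k)
--     keys = list(weights_dict)
--     for a in keys:
--         wa = weights_dict[a]
--         if wa == target_weight:
--             return [a]
--         for b in keys:
--             if a != b:
--                 s = wa + weights_dict[b]
--                 if s == target_weight:
--                     return [a, b]
--                 c = next((c for c in by_weight.get(target_weight - s, ())
--                           if c != a and c != b), None)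
--                 if c is not None:
--                     return [a, b, c]
--     return []
-- ===== Notes on version B (the rewrite author's own statement) =====
-- stated objective: faster
-- what changed: B precomputes a weight->ordered-keys index once and replaces A's innermost scan over all keys by a single remainder lookup in that index (taking the first candidate key distinct from the two outer keys), turning the triple nested scan into a double one.
import Mathlib
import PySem

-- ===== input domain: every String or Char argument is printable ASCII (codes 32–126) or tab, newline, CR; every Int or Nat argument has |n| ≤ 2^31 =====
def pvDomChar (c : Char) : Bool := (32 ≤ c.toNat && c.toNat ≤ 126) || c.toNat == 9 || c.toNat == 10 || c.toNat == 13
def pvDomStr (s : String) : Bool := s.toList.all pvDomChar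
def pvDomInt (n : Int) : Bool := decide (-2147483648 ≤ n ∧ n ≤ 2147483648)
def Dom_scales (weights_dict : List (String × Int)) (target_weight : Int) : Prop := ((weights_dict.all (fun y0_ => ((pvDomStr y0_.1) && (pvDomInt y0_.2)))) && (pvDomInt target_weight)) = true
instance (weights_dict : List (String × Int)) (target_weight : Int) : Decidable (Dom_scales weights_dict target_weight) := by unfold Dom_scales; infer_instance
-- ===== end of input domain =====

-- B replaces A's innermost scan over all keys by an O(1) lookup in a precomputed
-- weight→keys index (O(n^3) → O(n^2)); return values are identical.

-- ===== PORT A =====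
-- the argument dict (keys are unique, insertion order); weights_dict[k] for k a key
-- of the dict never raises, so getD _ _ 0 is exact here
def scalesLoopC (d : PySem.Dict String Int) (t : Int) (a b : String) :
    List String → Option (List String)
  | [] => none
  | c :: cs =>
    if a ≠ c ∧ b ≠ c then
      if d.getD a 0 + d.getD b 0 + d.getD c 0 = t then some [a, b, c]
      else scalesLoopC d t a b cs
    else scalesLoopC d t a b cs

def scalesLoopB (d : PySem.Dict String Int) (t : Int) (a : String) :
    List String → Option (List String)
  | [] => none
  | b :: bs =>
    if a ≠ b then
      if d.getD a 0 + d.getD b 0 = t then some [a, b]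
      else
        match scalesLoopC d t a b d.keys with
        | some r => some r
        | none => scalesLoopB d t a bs
    else scalesLoopB d t a bs

def scalesLoopA (d : PySem.Dict String Int) (t : Int) :
    List String → Option (List String)
  | [] => none
  | a :: as =>
    if d.getD a 0 = t then some [a]
    else
      match scalesLoopB d t a d.keys with
      | some r => some r
      | none => scalesLoopA d t as

def scales (weights_dict : List (String × Int)) (target_weight : Int) : List String :=
  let d := PySem.Dict.ofList weights_dict
  (scalesLoopA d target_weight d.keys).getD []

-- ===== PORT B =====
-- by_weight.setdefault(v, []).append(k) over the dict's items
def scalesIndex (d : PySem.Dict String Int) : PySem.Dict Int (List String) :=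
  d.items.foldl (fun m p => m.modify p.2 [] (· ++ [p.1])) PySem.Dict.empty

def scalesAltLoopB (d : PySem.Dict String Int) (wm : PySem.Dict Int (List String))
    (t : Int) (a : String) : List String → Option (List String)
  | [] => none
  | b :: bs =>
    if a ≠ b then
      let s := d.getD a 0 + d.getD b 0
      if s = t then some [a, b]
      else
        match (wm.getD (t - s) []).find? (fun c => a ≠ c && b ≠ c) with
        | some c => some [a, b, c]
        | none => scalesAltLoopB d wm t a bs
    else scalesAltLoopB d wm t a bs

def scalesAltLoopA (d : PySem.Dict String Int) (wm : PySem.Dict Int (List String))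
    (t : Int) : List String → Option (List String)
  | [] => none
  | a :: as =>
    if d.getD a 0 = t then some [a]
    else
      match scalesAltLoopB d wm t a d.keys with
      | some r => some r
      | none => scalesAltLoopA d wm t as

def scales_alt (weights_dict : List (String × Int)) (target_weight : Int) : List String :=
  let d := PySem.Dict.ofList weights_dict
  let wm := scalesIndex d
  (scalesAltLoopA d wm target_weight d.keys).getD []

-- ===== PRECONDITION & SPEC =====
def Spec_scales (weights_dict : List (String × Int)) (target_weight : Int) (out : List String) : Prop := out = scales_alt weights_dict target_weight
instance (weights_dict : List (String × Int)) (target_weight : Int) (out : List String) : Decidable (Spec_scales weights_dict target_weight out) := by unfold Spec_scales; infer_instance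

-- ===== CLAIM (what is proved, stated in full; the proofs are below) =====
def Claim_equal_scales : Prop := ∀ (weights_dict : List (String × Int)) (target_weight : Int), Dom_scales weights_dict target_weight → Spec_scales weights_dict target_weight (scales weights_dict target_weight)

-- ===== LEMMAS AND PROOFS =====

-- find? over a filtered list = find? of the conjunction
theorem find?_filter_conj {α : Type} (p q : α → Bool) (l : List α) :
    (l.filter p).find? q = l.find? (fun x => p x && q x) := by
  induction l with
  | nil => rfl
  | cons x xs ih =>
    by_cases hp : p x = true
    · by_cases hq : q x = true
      · simp [List.filter, List.find?, hp, hq]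
      · simp [List.filter, List.find?, hp, hq, ih]
    · simp [List.filter, List.find?, hp, ih]

-- A's innermost loop is the first match of the combined predicate
theorem loopC_eq_find? (d : PySem.Dict String Int) (t : Int) (a b : String)
    (l : List String) :
    scalesLoopC d t a b l =
      (l.find? (fun c => (a ≠ c && b ≠ c) &&
          (d.getD a 0 + d.getD b 0 + d.getD c 0 == t))).map (fun c => [a, b, c]) := by
  induction l with
  | nil => rfl
  | cons c cs ih =>
    by_cases h1 : a ≠ c ∧ b ≠ c
    · by_cases h2 : d.getD a 0 + d.getD b 0 + d.getD c 0 = t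
      · rw [List.find?_cons_of_pos (h := by simp [h1.1, h1.2, h2])]
        simp [scalesLoopC, h1, h2]
      · rw [List.find?_cons_of_neg (h := by simp [h2])]
        simp [scalesLoopC, h1, h2, ih]
    · rw [List.find?_cons_of_neg (h := by
        rcases not_and_or.mp h1 with h | h <;> simp at h <;> simp [h])]
      simp [scalesLoopC, h1, ih]

-- the precomputed index lists, for each weight, exactly the keys of that weight in order
theorem index_getD (d : PySem.Dict String Int) (hnd : d.keys.Nodup) (v : Int) :
    (scalesIndex d).getD v [] = d.keys.filter (fun c => d.getD c 0 == v) := by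
  unfold scalesIndex
  have h1 : d.items.foldl (fun m p => m.modify p.2 [] (· ++ [p.1])) PySem.Dict.empty
      = (d.items.map Prod.swap).foldl (fun m p => m.modify p.1 [] (· ++ [p.2])) PySem.Dict.empty := by
    rw [List.foldl_map]
    rfl
  rw [h1, PySem.Dict.getD_foldl_modify_append, PySem.Dict.getD_empty]
  rw [PySem.Dict.items_eq_map_keys d hnd 0]
  simp [List.map_map, List.filter_map, Function.comp_def]

-- B's O(1) lookup computes exactly what A's innermost scan computes
theorem loopC_eq_lookup (d : PySem.Dict String Int) (hnd : d.keys.Nodup)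
    (t : Int) (a b : String) :
    scalesLoopC d t a b d.keys =
      (((scalesIndex d).getD (t - (d.getD a 0 + d.getD b 0)) []).find?
        (fun c => a ≠ c && b ≠ c)).map (fun c => [a, b, c]) := by
  rw [loopC_eq_find?, index_getD d hnd, find?_filter_conj]
  have hpred : (fun c => (d.getD c 0 == t - (d.getD a 0 + d.getD b 0)) && (a ≠ c && b ≠ c))
      = (fun c => (a ≠ c && b ≠ c) && (d.getD a 0 + d.getD b 0 + d.getD c 0 == t)) := by
    funext c
    have h2 : (d.getD c 0 == t - (d.getD a 0 + d.getD b 0))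
        = (d.getD a 0 + d.getD b 0 + d.getD c 0 == t) := by
      rw [Bool.eq_iff_iff]; simp only [beq_iff_eq]; omega
    rw [← h2, Bool.and_comm]
  rw [hpred]

theorem loopB_eq (d : PySem.Dict String Int) (hnd : d.keys.Nodup)
    (t : Int) (a : String) (l : List String) :
    scalesLoopB d t a l = scalesAltLoopB d (scalesIndex d) t a l := by
  induction l with
  | nil => rfl
  | cons b bs ih =>
    by_cases h1 : a ≠ b
    · by_cases h2 : d.getD a 0 + d.getD b 0 = t
      · simp [scalesLoopB, scalesAltLoopB, h1, h2]
      · simp only [scalesLoopB, scalesAltLoopB, h2]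
        rw [loopC_eq_lookup d hnd, ih]
        cases ((scalesIndex d).getD (t - (d.getD a 0 + d.getD b 0)) []).find?
            (fun c => a ≠ c && b ≠ c) <;> simp [h1]
    · simp [scalesLoopB, scalesAltLoopB, h1, ih]

theorem loopA_eq (d : PySem.Dict String Int) (hnd : d.keys.Nodup)
    (t : Int) (l : List String) :
    scalesLoopA d t l = scalesAltLoopA d (scalesIndex d) t l := by
  induction l with
  | nil => rfl
  | cons a as ih =>
    simp only [scalesLoopA, scalesAltLoopA, loopB_eq d hnd, ih]

-- ===== VERDICT (by name: the statement is the Claim_ definition above) =====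
theorem scales_spec : Claim_equal_scales := by
  intro wd t _
  unfold Spec_scales
  show (scalesLoopA (PySem.Dict.ofList wd) t (PySem.Dict.ofList wd).keys).getD [] =
    (scalesAltLoopA (PySem.Dict.ofList wd) (scalesIndex (PySem.Dict.ofList wd)) t
      (PySem.Dict.ofList wd).keys).getD []
  rw [loopA_eq _ (PySem.Dict.nodup_keys_ofList wd)]
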